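-- pv_equiv track=rewrite | github.com/openstack-archive/tripleo-validations | doc/source/_exts/ansible-autodoc.py | _license_filter
-- ===== SOURCE A (Python) =====
-- def _license_filter(data):
--     """This will filter out our boilerplate license heading in return data.
--
--     The filter is used to allow documentation we're creating in variable
--     files to be rendered more beautifully.
--     """
--     lines = list()
--     mark = True
--     for line in data.splitlines():
--         if '# Copyright' in line:
--             mark = False
--         if mark:
--             lines.append(line)
--         if '# under the License' in line:
--             mark = True
--     return '\n'.join(lines)
-- ===== SOURCE B (Python) =====
-- def _license_filter(data):
--     """Skip-ahead scan: on a '# Copyright' line, jump past the whole license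
--     block (through its '# under the License' terminator, or to the end);
--     otherwise keep the line. No running mark flag is maintained."""
--     lines = data.splitlines()
--     kept = []
--     idx = 0
--     n = len(lines)
--     while idx < n:
--         line = lines[idx]
--         if '# Copyright' in line:
--             while idx < n and '# under the License' not in lines[idx]:
--                 idx += 1
--             idx += 1
--         else:
--             kept.append(line)
--             idx += 1
--     return '\n'.join(kept)
-- ===== Notes on version B (the rewrite author's own statement) =====
-- stated objective: alternative
-- what changed: Replaces the per-line mark-flag state machine by a skip-ahead scan: on a '# Copyright' line an inner loop jumps past the entire block through its terminator, so non-block lines are appended with no flag bookkeeping.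
import Mathlib
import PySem

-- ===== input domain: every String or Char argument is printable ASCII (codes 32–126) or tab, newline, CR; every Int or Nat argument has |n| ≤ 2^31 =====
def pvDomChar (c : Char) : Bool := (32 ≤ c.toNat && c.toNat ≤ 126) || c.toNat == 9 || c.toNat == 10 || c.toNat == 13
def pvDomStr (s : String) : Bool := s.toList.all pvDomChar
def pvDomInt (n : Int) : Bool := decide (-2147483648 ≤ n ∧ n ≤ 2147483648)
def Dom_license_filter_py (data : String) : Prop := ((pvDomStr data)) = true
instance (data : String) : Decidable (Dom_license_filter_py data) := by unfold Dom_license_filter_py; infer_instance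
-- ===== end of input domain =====

-- B replaces A's mark-flag state machine by a skip-ahead scan over the lines (same cost, different decomposition).

-- ===== PORT A =====
-- loop body of A's 'for line in data.splitlines()': state = (lines, mark)
def pvStepA (st : List String × Bool) (line : String) : List String × Bool :=
  let mark := if PySem.Str.isIn "# Copyright" line then false else st.2
  let lines := if mark then st.1 ++ [line] else st.1
  let mark := if PySem.Str.isIn "# under the License" line then true else mark
  (lines, mark)

def license_filter_py (data : String) : String :=
  PySem.Str.join "\n" ((PySem.Str.splitlines data).foldl pvStepA ([], true)).1

-- ===== PORT B =====
-- B's inner while loop: skip lines through the '# under the License' terminator (or to the end)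
def pvSkipBlock : List String → List String
  | [] => []
  | l :: rest => if PySem.Str.isIn "# under the License" l then rest else pvSkipBlock rest

lemma pvSkipBlock_length_le : ∀ ls : List String, (pvSkipBlock ls).length ≤ ls.length
  | [] => le_refl _
  | l :: rest => by
      simp only [pvSkipBlock]
      split
      · simp
      · exact le_trans (pvSkipBlock_length_le rest) (Nat.le_succ _)

-- B's outer while loop on the remaining suffix of lines
def pvKeep : List String → List String
  | [] => []
  | l :: rest =>
    if PySem.Str.isIn "# Copyright" l then
      pvKeep (pvSkipBlock (l :: rest))
    else
      l :: pvKeep rest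
  termination_by ls => ls.length
  decreasing_by
    · simp only [pvSkipBlock]
      split
      · simp
      · exact Nat.lt_succ_of_le (pvSkipBlock_length_le rest)
    · simp

def license_filter_py_alt (data : String) : String :=
  PySem.Str.join "\n" (pvKeep (PySem.Str.splitlines data))

-- ===== PRECONDITION & SPEC =====
def Spec_license_filter_py (data : String) (out : String) : Prop := out = license_filter_py_alt data
instance (data : String) (out : String) : Decidable (Spec_license_filter_py data out) := by unfold Spec_license_filter_py; infer_instance

-- ===== CLAIM (what is proved, stated in full; the proofs are below) =====
def Claim_equal_license_filter_py : Prop := ∀ (data : String), Dom_license_filter_py data → Spec_license_filter_py data (license_filter_py data)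

-- ===== LEMMAS AND PROOFS =====
-- Invariant tying A's fold state to B's two phases: with mark = true the fold appends
-- exactly pvKeep of the remaining lines; with mark = false it appends pvKeep of the
-- lines after the current block is skipped.
lemma pv_main (ls : List String) : ∀ acc : List String,
    ((ls.foldl pvStepA (acc, true)).1 = acc ++ pvKeep ls) ∧
    ((ls.foldl pvStepA (acc, false)).1 = acc ++ pvKeep (pvSkipBlock ls)) := by
  induction ls with
  | nil => intro acc; simp [pvKeep, pvSkipBlock]
  | cons l rest ih =>
    intro acc
    by_cases hc : PySem.Str.isIn "# Copyright" l = true <;>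
      by_cases ht : PySem.Str.isIn "# under the License" l = true <;>
      simp at hc ht <;>
      constructor <;>
      simp [pvStepA, pvKeep, pvSkipBlock, hc, ht, (ih acc).1, (ih acc).2,
            (ih (acc ++ [l])).1]

-- ===== VERDICT (by name: the statement is the Claim_ definition above) =====
theorem license_filter_py_spec : Claim_equal_license_filter_py := by
  intro data _
  unfold Spec_license_filter_py license_filter_py license_filter_py_alt
  rw [(pv_main (PySem.Str.splitlines data) []).1]
  rfl
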